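-- pv_equiv track=rewrite | github.com/Hardikchandra/VIDHYA | out_new.py | convert_numbers_and_terms_to_hindi
-- ===== SOURCE A (Python) =====
-- def convert_numbers_and_terms_to_hindi(text):
--     number_map = {
--         '0': 'शून्य', '1': 'एक', '2': 'दो', '3': 'तीन', '4': 'चार',
--         '5': 'पाँच', '6': 'छह', '7': 'सात', '8': 'आठ', '9': 'नौ'
--     }
--
--     term_map = {
--         'x': 'गुणा',  # multiplication
--         '*': 'गुणा',  # multiplication (if used)
--         '+': 'जोड़',   # addition
--         '-': 'घटाना',  # subtraction
--         '/': 'भाग',    # division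
--         '=': 'बराबर'   # equal
--     }
--
--     # Replace numbers
--     for eng_num, hindi_num in number_map.items():
--         text = text.replace(eng_num, hindi_num)
--
--     # Replace mathematical terms
--     for eng_term, hindi_term in term_map.items():
--         text = text.replace(eng_term, hindi_term)
--
--     return text
-- ===== SOURCE B (Python) =====
-- def convert_numbers_and_terms_to_hindi(text):
--     combined = {
--         '0': 'शून्य', '1': 'एक', '2': 'दो', '3': 'तीन', '4': 'चार',
--         '5': 'पाँच', '6': 'छह', '7': 'सात', '8': 'आठ', '9': 'नौ',
--         'x': 'गुणा', '*': 'गुणा', '+': 'जोड़', '-': 'घटाना',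
--         '/': 'भाग', '=': 'बराबर'
--     }
--     parts = []
--     for ch in text:
--         parts.append(combined.get(ch, ch))
--     return ''.join(parts)
-- ===== Notes on version B (the rewrite author's own statement) =====
-- stated objective: simpler
-- what changed: Replaces A's 16 sequential full-string .replace() passes with a single left-to-right scan over the characters using one merged lookup table (correct because no replacement word contains any mapped character).
import Mathlib
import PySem

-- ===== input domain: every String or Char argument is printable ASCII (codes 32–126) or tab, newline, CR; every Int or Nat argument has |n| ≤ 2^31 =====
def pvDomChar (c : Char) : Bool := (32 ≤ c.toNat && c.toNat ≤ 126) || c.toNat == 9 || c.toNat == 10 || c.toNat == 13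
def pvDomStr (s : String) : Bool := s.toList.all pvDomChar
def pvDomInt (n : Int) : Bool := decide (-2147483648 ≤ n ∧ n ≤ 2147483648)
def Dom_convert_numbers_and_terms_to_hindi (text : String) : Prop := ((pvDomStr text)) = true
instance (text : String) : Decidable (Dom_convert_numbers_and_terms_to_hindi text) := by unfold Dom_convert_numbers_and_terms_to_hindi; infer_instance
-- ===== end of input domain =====

-- ===== PORT A =====
-- B changes only the return-value computation strategy; one honest line: same mapping done in a single scan with one merged table instead of 16 sequential full-string replaces.
def pvNumberMap : List (String × String) :=
  [("0", "शून्य"), ("1", "एक"), ("2", "दो"), ("3", "तीन"), ("4", "चार"),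
   ("5", "पाँच"), ("6", "छह"), ("7", "सात"), ("8", "आठ"), ("9", "नौ")]

def pvTermMap : List (String × String) :=
  [("x", "गुणा"), ("*", "गुणा"), ("+", "जोड़"), ("-", "घटाना"), ("/", "भाग"), ("=", "बराबर")]

def convert_numbers_and_terms_to_hindi (text : String) : String :=
  -- for eng_num, hindi_num in number_map.items(): text = text.replace(eng_num, hindi_num)
  let t1 := pvNumberMap.foldl (fun t p => PySem.Str.replace t p.1 p.2) text
  -- for eng_term, hindi_term in term_map.items(): text = text.replace(eng_term, hindi_term)
  pvTermMap.foldl (fun t p => PySem.Str.replace t p.1 p.2) t1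

-- ===== PORT B =====
def pvCombined : PySem.Dict Char String := PySem.Dict.mk
  [('0', "शून्य"), ('1', "एक"), ('2', "दो"), ('3', "तीन"), ('4', "चार"),
   ('5', "पाँच"), ('6', "छह"), ('7', "सात"), ('8', "आठ"), ('9', "नौ"),
   ('x', "गुणा"), ('*', "गुणा"), ('+', "जोड़"), ('-', "घटाना"), ('/', "भाग"), ('=', "बराबर")]

def convert_numbers_and_terms_to_hindi_alt (text : String) : String :=
  -- parts = []; for ch in text: parts.append(combined.get(ch, ch)); return ''.join(parts)
  PySem.Str.join "" (text.toList.map (fun ch => pvCombined.getD ch (String.singleton ch)))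

-- ===== PRECONDITION & SPEC =====
def Spec_convert_numbers_and_terms_to_hindi (text : String) (out : String) : Prop := out = convert_numbers_and_terms_to_hindi_alt text
instance (text : String) (out : String) : Decidable (Spec_convert_numbers_and_terms_to_hindi text out) := by unfold Spec_convert_numbers_and_terms_to_hindi; infer_instance

-- ===== CLAIM (what is proved, stated in full; the proofs are below) =====
def Claim_equal_convert_numbers_and_terms_to_hindi : Prop := ∀ (text : String), Dom_convert_numbers_and_terms_to_hindi text → Spec_convert_numbers_and_terms_to_hindi text (convert_numbers_and_terms_to_hindi text)

-- ===== LEMMAS AND PROOFS =====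
-- the per-character effect of the whole sequence of single-character replaces, read off A's loop
def pvSeqApply : List (Char × List Char) → Char → List Char
  | [], x => [x]
  | (c, w) :: t, x => if x = c then w.flatMap (fun y => pvSeqApply t y) else pvSeqApply t x

-- A's pairs, at the character level
def pvCharPairs : List (Char × List Char) :=
  [('0', ['श', 'ू', 'न', '्', 'य']), ('1', ['ए', 'क']), ('2', ['द', 'ो']), ('3', ['त', 'ी', 'न']),
   ('4', ['च', 'ा', 'र']), ('5', ['प', 'ा', 'ँ', 'च']), ('6', ['छ', 'ह']), ('7', ['स', 'ा', 'त']),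
   ('8', ['आ', 'ठ']), ('9', ['न', 'ौ']),
   ('x', ['ग', 'ु', 'ण', 'ा']), ('*', ['ग', 'ु', 'ण', 'ा']), ('+', ['ज', 'ो', 'ड', '़']),
   ('-', ['घ', 'ट', 'ा', 'न', 'ा']), ('/', ['भ', 'ा', 'ग']), ('=', ['ब', 'र', 'ा', 'ब', 'र'])]

lemma pv_pairs_bridge :
    (pvNumberMap ++ pvTermMap).map (fun p => (p.1.toList, p.2.toList))
      = pvCharPairs.map (fun p => ([p.1], p.2)) := by decide

lemma pv_join_empty_sep (l : List (List Char)) : PySem.Chars.join [] l = l.flatten := by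
  simp only [PySem.Chars.join, List.intercalate]
  induction l with
  | nil => rfl
  | cons a t ih => cases t <;> simp_all [List.intersperse]

lemma pv_go_single (c : Char) (rep : List Char) :
    ∀ (l : List Char) (fuel : Nat) (acc : List Char), l.length ≤ fuel →
    PySem.Chars.replace.go [c] rep fuel l acc
      = acc.reverse ++ l.flatMap (fun x => if x = c then rep else [x]) := by
  intro l
  induction l with
  | nil => intro fuel acc h; cases fuel <;> simp [PySem.Chars.replace.go]
  | cons a t ih =>
    intro fuel acc h
    cases fuel with
    | zero => simp at h
    | succ f =>
      simp only [PySem.Chars.replace.go]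
      by_cases hc : a = c
      · subst hc
        rw [if_pos (by simp [List.isPrefixOf])]
        simp only [List.length_cons, List.length_nil, Nat.zero_add, List.drop_succ_cons,
          List.drop_zero]
        rw [ih f _ (by simpa using h)]
        simp
      · have hpre : ¬([c].isPrefixOf (a :: t) = true) := by
          simp only [List.isPrefixOf, Bool.and_eq_true, beq_iff_eq]
          exact fun hca => hc hca.1.symm
        rw [if_neg hpre]
        rw [ih f _ (by simpa using h)]
        simp [hc]

lemma pv_replace_single (l : List Char) (c : Char) (rep : List Char) :
    PySem.Chars.replace l [c] rep = l.flatMap (fun x => if x = c then rep else [x]) := by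
  rw [PySem.Chars.replace, if_neg (by simp), pv_go_single c rep l l.length [] le_rfl]
  simp

lemma pv_foldl_replace_toList (ps : List (String × String)) (t : String) :
    (ps.foldl (fun t p => PySem.Str.replace t p.1 p.2) t).toList
      = (ps.map (fun p => (p.1.toList, p.2.toList))).foldl
          (fun l q => PySem.Chars.replace l q.1 q.2) t.toList := by
  induction ps generalizing t with
  | nil => rfl
  | cons p t' ih =>
    rw [List.foldl_cons, List.map_cons, List.foldl_cons, ih]
    congr 1
    simp [PySem.Str.replace]

lemma pv_fold_eq (ps : List (Char × List Char)) (l : List Char) :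
    ps.foldl (fun l p => PySem.Chars.replace l [p.1] p.2) l = l.flatMap (pvSeqApply ps) := by
  induction ps generalizing l with
  | nil => simp [pvSeqApply]
  | cons p t ih =>
    obtain ⟨c, w⟩ := p
    rw [List.foldl_cons, pv_replace_single, ih, List.flatMap_assoc]
    congr 1
    funext x
    by_cases hx : x = c <;> simp [pvSeqApply, hx]

lemma pv_point (x : Char) :
    pvSeqApply pvCharPairs x = (pvCombined.getD x (String.singleton x)).toList := by
  by_cases h0 : x = '0';   · subst h0; decide
  by_cases h1 : x = '1';   · subst h1; decide
  by_cases h2 : x = '2';   · subst h2; decide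
  by_cases h3 : x = '3';   · subst h3; decide
  by_cases h4 : x = '4';   · subst h4; decide
  by_cases h5 : x = '5';   · subst h5; decide
  by_cases h6 : x = '6';   · subst h6; decide
  by_cases h7 : x = '7';   · subst h7; decide
  by_cases h8 : x = '8';   · subst h8; decide
  by_cases h9 : x = '9';   · subst h9; decide
  by_cases hx : x = 'x';   · subst hx; decide
  by_cases hm : x = '*';   · subst hm; decide
  by_cases hp : x = '+';   · subst hp; decide
  by_cases hs : x = '-';   · subst hs; decide
  by_cases hd : x = '/';   · subst hd; decide
  by_cases he : x = '=';   · subst he; decide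
  have H0 : ¬('0' = x) := fun h => h0 h.symm
  have H1 : ¬('1' = x) := fun h => h1 h.symm
  have H2 : ¬('2' = x) := fun h => h2 h.symm
  have H3 : ¬('3' = x) := fun h => h3 h.symm
  have H4 : ¬('4' = x) := fun h => h4 h.symm
  have H5 : ¬('5' = x) := fun h => h5 h.symm
  have H6 : ¬('6' = x) := fun h => h6 h.symm
  have H7 : ¬('7' = x) := fun h => h7 h.symm
  have H8 : ¬('8' = x) := fun h => h8 h.symm
  have H9 : ¬('9' = x) := fun h => h9 h.symm
  have Hx : ¬('x' = x) := fun h => hx h.symm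
  have Hm : ¬('*' = x) := fun h => hm h.symm
  have Hp : ¬('+' = x) := fun h => hp h.symm
  have Hs : ¬('-' = x) := fun h => hs h.symm
  have Hd : ¬('/' = x) := fun h => hd h.symm
  have He : ¬('=' = x) := fun h => he h.symm
  simp [pvCharPairs, pvCombined, pvSeqApply, PySem.Dict.getD_eq_get?_getD,
    PySem.Dict.get?_mk_cons, h0, h1, h2, h3, h4, h5, h6, h7, h8, h9,
    hx, hm, hp, hs, hd, he, H0, H1, H2, H3, H4, H5, H6, H7, H8, H9,
    Hx, Hm, Hp, Hs, Hd, He]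
  simp [PySem.Dict.get?]

-- ===== VERDICT (by name: the statement is the Claim_ definition above) =====
theorem convert_numbers_and_terms_to_hindi_spec : Claim_equal_convert_numbers_and_terms_to_hindi := by
  intro text _
  unfold Spec_convert_numbers_and_terms_to_hindi
  apply String.toList_injective
  show (convert_numbers_and_terms_to_hindi text).toList
      = (convert_numbers_and_terms_to_hindi_alt text).toList
  rw [convert_numbers_and_terms_to_hindi, convert_numbers_and_terms_to_hindi_alt]
  rw [PySem.Str.toList_join, List.map_map,
    show ("" : String).toList = ([] : List Char) from rfl, pv_join_empty_sep]
  rw [← List.foldl_append, pv_foldl_replace_toList, pv_pairs_bridge, List.foldl_map]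
  rw [pv_fold_eq, List.flatMap_def]
  congr 1
  apply List.map_congr_left
  intro x _
  simpa [Function.comp] using pv_point x
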